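-- pv_equiv track=rewrite | github.com/fayza-khan/PythonQuestions | test2.py | is_fact
-- ===== SOURCE A (Python) =====
-- def is_fact(x):
--     prod = 1
--     y = []
--     while x != 0:
--         n = x % 10
--         x = int(x / 10)
--         y.append(n)
--     for i in y:
--         for k in range(1, i+1):
--             prod *= k
--     return prod
-- ===== SOURCE B (Python) =====
-- FACT = [1, 1, 2, 6, 24, 120, 720, 5040, 40320, 362880]
--
-- def is_fact(x):
--     cnt = [0] * 10
--     while x != 0:
--         cnt[x % 10] += 1
--         x = int(x / 10)
--     prod = 1
--     for d in range(10):
--         prod *= FACT[d] ** cnt[d]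
--     return prod
-- ===== Notes on version B (the rewrite author's own statement) =====
-- stated objective: alternative
-- what changed: B never builds the digit list or runs A's nested range-product loops: it tallies digit occurrences in a fixed-size counter array and then computes the result as the product over each decimal digit d of FACT[d]**cnt[d] from a precomputed factorial table.
import Mathlib
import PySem

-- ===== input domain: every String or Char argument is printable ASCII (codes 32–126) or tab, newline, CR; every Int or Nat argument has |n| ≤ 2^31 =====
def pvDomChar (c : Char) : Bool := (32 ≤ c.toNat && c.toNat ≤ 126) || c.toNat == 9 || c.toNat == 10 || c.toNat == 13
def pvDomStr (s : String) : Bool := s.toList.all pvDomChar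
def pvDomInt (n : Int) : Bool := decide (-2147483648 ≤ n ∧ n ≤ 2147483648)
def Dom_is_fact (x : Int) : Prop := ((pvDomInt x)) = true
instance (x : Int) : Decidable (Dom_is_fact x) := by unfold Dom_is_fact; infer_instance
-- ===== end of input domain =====

-- B replaces A's digit list and nested range-product loops by a fixed-size digit-occurrence
-- counter array and a fixed product FACT[d]^cnt[d] from a precomputed factorial table; objective:
-- alternative. Both are total; A = B on all of Dom.

-- Python's `int(x / 10)` truncates toward zero; Int.tdiv is exact for it on Dom
-- (|x| ≤ 2^31 < 2^53, where the float division is exact enough that truncation agrees).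
theorem isFact_tdiv_lt (x : Int) (h : ¬ x = 0) : (x.tdiv 10).natAbs < x.natAbs := by
  rw [Int.natAbs_tdiv]
  exact Nat.div_lt_self (by omega) (by norm_num)

-- ===== PORT A =====
-- the `while x != 0` loop of A, accumulating the list y (append at the end, as A does)
def isFactLoopA (x : Int) (y : List Int) : List Int :=
  if h : x = 0 then y
  else isFactLoopA (x.tdiv 10) (y ++ [PySem.Int.mod x 10])
termination_by x.natAbs
decreasing_by exact isFact_tdiv_lt x h

def is_fact (x : Int) : Int :=
  let y := isFactLoopA x []
  y.foldl (fun prod i => (PySem.List.pyRange 1 (i + 1) 1).foldl (fun p k => p * k) prod) 1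

-- ===== PORT B =====
-- B's precomputed table FACT
def factTable : List Int := [1, 1, 2, 6, 24, 120, 720, 5040, 40320, 362880]

-- B's counting loop `while x != 0: cnt[x % 10] += 1; x = int(x / 10)`
-- (the index x % 10 always lies in [0, 9], so list indexing never fails)
def isFactCnt (x : Int) (cnt : List Int) : List Int :=
  if h : x = 0 then cnt
  else isFactCnt (x.tdiv 10)
    (cnt.set (PySem.Int.mod x 10).toNat (cnt.getD (PySem.Int.mod x 10).toNat 0 + 1))
termination_by x.natAbs
decreasing_by exact isFact_tdiv_lt x h

-- B's final pass `for d in range(10): prod *= FACT[d] ** cnt[d]` (cnt[d] ≥ 0 always)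
def is_fact_alt (x : Int) : Int :=
  let cnt := isFactCnt x (List.replicate 10 0)
  (PySem.List.pyRange 0 10 1).foldl
    (fun prod d => prod * (factTable.getD d.toNat 0) ^ (cnt.getD d.toNat 0).toNat) 1

-- ===== PRECONDITION & SPEC =====
def Spec_is_fact (x : Int) (out : Int) : Prop := out = is_fact_alt x
instance (x : Int) (out : Int) : Decidable (Spec_is_fact x out) := by unfold Spec_is_fact; infer_instance

-- ===== CLAIM (what is proved, stated in full; the proofs are below) =====
def Claim_equal_is_fact : Prop := ∀ (x : Int), Dom_is_fact x → Spec_is_fact x (is_fact x)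

-- ===== LEMMAS AND PROOFS =====

-- proof-only characterisation: the product of the factorials of A's digit sequence of x
def digitFactProd (x : Int) : Int :=
  if h : x = 0 then 1
  else ((PySem.Int.mod x 10).toNat.factorial : Int) * digitFactProd (x.tdiv 10)
termination_by x.natAbs
decreasing_by exact isFact_tdiv_lt x h

theorem isFact_mod_nonneg (x : Int) : 0 ≤ PySem.Int.mod x 10 := by
  rw [PySem.Int.mod_eq_emod_of_pos (by norm_num)]
  exact Int.emod_nonneg x (by norm_num)

theorem isFact_mod_lt (x : Int) : PySem.Int.mod x 10 < 10 := by
  rw [PySem.Int.mod_eq_emod_of_pos (by norm_num)]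
  exact Int.emod_lt_of_pos x (by norm_num)

-- A's inner `for k in range(1, i+1)` loop multiplies p by i!
theorem isFact_inner (n : Nat) (p : Int) :
    (PySem.List.pyRange 1 ((n : Int) + 1) 1).foldl (fun p k => p * k) p
      = p * (n.factorial : Int) := by
  induction n generalizing p with
  | zero => simp [PySem.List.pyRange_one_eq_nil (by norm_num : (1:Int) ≤ 1)]
  | succ m ih =>
    rw [show ((m + 1 : Nat) : Int) = (m : Int) + 1 by push_cast; ring,
        PySem.List.pyRange_one_succ_right (by omega)]
    rw [List.foldl_append, ih]
    simp only [List.foldl_cons, List.foldl_nil, Nat.factorial_succ]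
    push_cast
    ring

theorem isFactLoopA_unfold (x : Int) (h : ¬ x = 0) (y : List Int) :
    isFactLoopA x y = isFactLoopA (x.tdiv 10) (y ++ [PySem.Int.mod x 10]) := by
  conv_lhs => rw [isFactLoopA]
  simp only [h, dif_neg, not_false_iff]

theorem isFactLoopA_append : ∀ (n : Nat) (x : Int), x.natAbs ≤ n →
    ∀ y, isFactLoopA x y = y ++ isFactLoopA x [] := by
  intro n
  induction n with
  | zero =>
    intro x hx y
    have : x = 0 := by omega
    simp [this, isFactLoopA]
  | succ m ih =>
    intro x hx y
    by_cases h : x = 0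
    · simp [h, isFactLoopA]
    · have hlt := isFact_tdiv_lt x h
      rw [isFactLoopA_unfold x h y, isFactLoopA_unfold x h []]
      rw [ih _ (by omega) (y ++ [PySem.Int.mod x 10]),
          ih _ (by omega) ([] ++ [PySem.Int.mod x 10])]
      simp

-- A's value is digitFactProd
theorem isFact_A_eq : ∀ (n : Nat) (x : Int), x.natAbs ≤ n → ∀ p,
    (isFactLoopA x []).foldl
      (fun prod i => (PySem.List.pyRange 1 (i + 1) 1).foldl (fun p k => p * k) prod) p
      = p * digitFactProd x := by
  intro n
  induction n with
  | zero =>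
    intro x hx p
    have : x = 0 := by omega
    simp [this, isFactLoopA, digitFactProd]
  | succ m ih =>
    intro x hx p
    by_cases h : x = 0
    · simp [h, isFactLoopA, digitFactProd]
    · have hlt := isFact_tdiv_lt x h
      rw [isFactLoopA_unfold x h []]
      rw [isFactLoopA_append _ _ (by omega : (x.tdiv 10).natAbs ≤ m),
          List.nil_append, List.singleton_append, List.foldl_cons]
      rw [ih _ (by omega)]
      conv_rhs => rw [digitFactProd]
      simp only [h, dif_neg, not_false_iff]
      have hm := isFact_mod_nonneg x
      have hmod : PySem.Int.mod x 10 = ((PySem.Int.mod x 10).toNat : Int) := by omega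
      rw [hmod, isFact_inner]
      simp only [Int.toNat_natCast]
      ring

-- B's final pass over a count list, with accumulator p
def isFactP (c : List Int) (p : Int) : Int :=
  (PySem.List.pyRange 0 10 1).foldl
    (fun prod d => prod * (factTable.getD d.toNat 0) ^ (c.getD d.toNat 0).toNat) p

theorem isFact_range10 : PySem.List.pyRange 0 10 1 = [0,1,2,3,4,5,6,7,8,9] := by decide

-- incrementing slot m of the count list multiplies the final pass's value by m!
theorem isFact_P_set (c : List Int) (hlen : c.length = 10) (hnn : ∀ e ∈ c, 0 ≤ e)
    (m : Nat) (hm : m < 10) (p : Int) :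
    isFactP (c.set m (c.getD m 0 + 1)) p = isFactP c p * (m.factorial : Int) := by
  match c, hlen with
  | [a0,a1,a2,a3,a4,a5,a6,a7,a8,a9], _ =>
    have e0 : (a0+1).toNat = a0.toNat + 1 := by have := hnn a0 (by simp); omega
    have e1 : (a1+1).toNat = a1.toNat + 1 := by have := hnn a1 (by simp); omega
    have e2 : (a2+1).toNat = a2.toNat + 1 := by have := hnn a2 (by simp); omega
    have e3 : (a3+1).toNat = a3.toNat + 1 := by have := hnn a3 (by simp); omega
    have e4 : (a4+1).toNat = a4.toNat + 1 := by have := hnn a4 (by simp); omega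
    have e5 : (a5+1).toNat = a5.toNat + 1 := by have := hnn a5 (by simp); omega
    have e6 : (a6+1).toNat = a6.toNat + 1 := by have := hnn a6 (by simp); omega
    have e7 : (a7+1).toNat = a7.toNat + 1 := by have := hnn a7 (by simp); omega
    have e8 : (a8+1).toNat = a8.toNat + 1 := by have := hnn a8 (by simp); omega
    have e9 : (a9+1).toNat = a9.toNat + 1 := by have := hnn a9 (by simp); omega
    interval_cases m <;>
      simp [isFactP, isFact_range10, factTable, List.set, List.getD,
        e0, e1, e2, e3, e4, e5, e6, e7, e8, e9, pow_succ, Nat.factorial] <;>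
      ring

theorem isFactCnt_unfold (x : Int) (h : ¬ x = 0) (c : List Int) :
    isFactCnt x c = isFactCnt (x.tdiv 10)
      (c.set (PySem.Int.mod x 10).toNat (c.getD (PySem.Int.mod x 10).toNat 0 + 1)) := by
  conv_lhs => rw [isFactCnt]
  simp only [h, dif_neg, not_false_iff]

-- B's counting loop followed by the final pass computes digitFactProd
theorem isFact_B_eq : ∀ (n : Nat) (x : Int), x.natAbs ≤ n →
    ∀ (c : List Int), c.length = 10 → (∀ e ∈ c, 0 ≤ e) → ∀ p,
    isFactP (isFactCnt x c) p = isFactP c p * digitFactProd x := by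
  intro n
  induction n with
  | zero =>
    intro x hx c _ _ p
    have : x = 0 := by omega
    simp [this, isFactCnt, digitFactProd]
  | succ k ih =>
    intro x hx c hlen hnn p
    by_cases h : x = 0
    · simp [h, isFactCnt, digitFactProd]
    · have hlt := isFact_tdiv_lt x h
      have hm0 := isFact_mod_nonneg x
      have hm10 := isFact_mod_lt x
      set m := (PySem.Int.mod x 10).toNat with hmdef
      have hmlt : m < 10 := by omega
      rw [isFactCnt_unfold x h c]
      have hlen' : (c.set m (c.getD m 0 + 1)).length = 10 := by
        simpa using hlen
      have hnn' : ∀ e ∈ c.set m (c.getD m 0 + 1), 0 ≤ e := by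
        intro e he
        rcases List.mem_or_eq_of_mem_set he with h' | h'
        · exact hnn e h'
        · have hmc : m < c.length := by omega
          have : 0 ≤ c.getD m 0 :=
            (List.getD_eq_getElem c 0 hmc) ▸ hnn _ (List.getElem_mem hmc)
          omega
      rw [ih _ (by omega) _ hlen' hnn' p]
      rw [isFact_P_set c hlen hnn m hmlt p]
      conv_rhs => rw [digitFactProd]
      simp only [h, dif_neg, not_false_iff]
      ring

theorem isFactP_init : isFactP (List.replicate 10 0) 1 = 1 := by decide

-- ===== VERDICT (by name: the statement is the Claim_ definition above) =====
theorem is_fact_spec : Claim_equal_is_fact := by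
  intro x _
  show is_fact x = is_fact_alt x
  have hA : is_fact x = digitFactProd x := by
    have := isFact_A_eq x.natAbs x le_rfl 1
    simpa [is_fact] using this
  have hB : is_fact_alt x = digitFactProd x := by
    have h := isFact_B_eq x.natAbs x le_rfl (List.replicate 10 0) (by simp)
      (by intro e he; simp at he; omega) 1
    rw [isFactP_init, one_mul] at h
    exact h
  rw [hA, hB]
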